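-- pv_equiv track=rewrite | github.com/Jodode/sys-analysis | task2/task2.py | calc_matrix
-- ===== SOURCE A (Python) =====
-- def calc_matrix(matrix: list, graph: dict) -> list:
--     relation_matrix = [[0] * 5 for _ in range(len(matrix))]
--     for i in range(len(matrix)):
--         relation_matrix[i][0] = len(graph[i + 1]) if (i + 1) in graph else 0
--         relation_matrix[i][1] = sum([1 if (i + 1) in nodes else 0 for nodes in graph.values()])
--         relation_matrix[i][2] = 0 if relation_matrix[i][1] else relation_matrix[i][0]
--         relation_matrix[i][3] = len([1 for p2, c2 in graph.items() for p1, c1 in graph.items() if (i+1) in c1 if p1 in c2])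
--         relation_matrix[i][4] = (lambda x: len(x) - 1 if (i + 1) in x else len(x))([c for p, c in graph.items() if i + 1 in c])
--
--     return relation_matrix
-- ===== SOURCE B (Python) =====
-- def calc_matrix(matrix: list, graph: dict) -> list:
--     # One pass over the edges builds preds[v] = list of keys whose adjacency
--     # list contains v (each key once); every column is then a cheap lookup.
--     preds = {}
--     for p, c in graph.items():
--         for v in set(c):
--             preds[v] = preds.get(v, []) + [p]
--     res = []
--     for i in range(len(matrix)):
--         v = i + 1
--         ps = preds.get(v, [])
--         d = len(ps)
--         o = len(graph.get(v, []))
--         res.append([o, d, 0 if d else o,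
--                     sum(len(preds.get(p, [])) for p in ps), d])
--     return res
-- ===== Notes on version B (the rewrite author's own statement) =====
-- stated objective: faster
-- what changed: Instead of rescanning all adjacency lists (and, for column 3, all pairs of them) for every node, B builds the predecessor lists once in a single pass over the edges and reads every column of each row off that index; column 3 becomes a sum of predecessor in-degrees and column 4 is the in-degree directly (A's 'i+1 in x' check compares an int with lists and is always false).
import Mathlib
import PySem

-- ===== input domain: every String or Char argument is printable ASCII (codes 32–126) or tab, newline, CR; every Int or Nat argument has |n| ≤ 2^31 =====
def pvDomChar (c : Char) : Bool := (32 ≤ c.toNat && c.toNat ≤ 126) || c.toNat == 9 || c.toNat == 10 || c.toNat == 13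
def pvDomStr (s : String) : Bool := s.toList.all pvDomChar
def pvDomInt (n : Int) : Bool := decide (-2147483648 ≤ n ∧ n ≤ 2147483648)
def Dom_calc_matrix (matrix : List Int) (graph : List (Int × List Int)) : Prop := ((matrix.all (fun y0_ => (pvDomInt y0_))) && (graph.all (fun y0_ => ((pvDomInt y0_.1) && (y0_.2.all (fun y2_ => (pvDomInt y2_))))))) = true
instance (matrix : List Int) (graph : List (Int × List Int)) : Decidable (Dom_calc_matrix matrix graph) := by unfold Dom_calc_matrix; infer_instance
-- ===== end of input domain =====

-- B replaces A's per-node rescans of the whole graph by a single pass that builds the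
-- predecessor lists once (objective: faster, asymptotic).

-- ===== PORT A =====
-- Python's `(i+1) in x` where x : list[list[int]] compares an int with lists: always False.
def pyIntEqList (_ : Int) (_ : List Int) : Bool := false

def calc_matrix (matrix : List Int) (graph : List (Int × List Int)) : List (List Int) :=
  let g : PySem.Dict Int (List Int) := PySem.Dict.ofList graph
  (List.range matrix.length).map (fun i =>
    let v : Int := (i : Int) + 1
    let r0 : Int := if g.contains v then ((g.getD v []).length : Int) else 0
    let r1 : Int := ((g.values).map (fun nodes => if v ∈ nodes then (1 : Int) else 0)).sum
    let r2 : Int := if r1 ≠ 0 then 0 else r0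
    let r3 : Int :=
      ((g.items.flatMap (fun pc2 =>
          g.items.filter (fun pc1 => decide (v ∈ pc1.2) && decide (pc1.1 ∈ pc2.2)))).length : Int)
    let r4 : Int :=
      (fun x : List (List Int) =>
        if x.any (fun c => pyIntEqList v c) then (x.length : Int) - 1 else (x.length : Int))
        ((g.items.filter (fun pc => decide (v ∈ pc.2))).map (·.2))
    [r0, r1, r2, r3, r4])

-- ===== PORT B =====
def calc_matrix_alt (matrix : List Int) (graph : List (Int × List Int)) : List (List Int) :=
  let g : PySem.Dict Int (List Int) := PySem.Dict.ofList graph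
  let preds : PySem.Dict Int (List Int) :=
    g.items.foldl (fun d pc =>
      (PySem.Set.ofList pc.2).foldl (fun d w => d.modify w [] (· ++ [pc.1])) d)
      PySem.Dict.empty
  (List.range matrix.length).map (fun i =>
    let v : Int := (i : Int) + 1
    let ps := preds.getD v []
    let dv : Int := (ps.length : Int)
    let o : Int := ((g.getD v []).length : Int)
    [o, dv, if dv ≠ 0 then 0 else o,
     (ps.map (fun p => ((preds.getD p []).length : Int))).sum, dv])

-- ===== PRECONDITION & SPEC =====
def Spec_calc_matrix (matrix : List Int) (graph : List (Int × List Int)) (out : List (List Int)) : Prop := out = calc_matrix_alt matrix graph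
instance (matrix : List Int) (graph : List (Int × List Int)) (out : List (List Int)) : Decidable (Spec_calc_matrix matrix graph out) := by unfold Spec_calc_matrix; infer_instance

-- ===== CLAIM (what is proved, stated in full; the proofs are below) =====
def Claim_equal_calc_matrix : Prop := ∀ (matrix : List Int) (graph : List (Int × List Int)), Dom_calc_matrix matrix graph → Spec_calc_matrix matrix graph (calc_matrix matrix graph)

-- ===== LEMMAS AND PROOFS =====

-- inner loop of B's build: folding one adjacency list (as a set) appends p to key v iff v is in it
theorem preds_inner (S : List Int) (hS : S.Nodup) (d : PySem.Dict Int (List Int)) (p v : Int) :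
    (S.foldl (fun d w => d.modify w [] (· ++ [p])) d).getD v []
      = d.getD v [] ++ (if v ∈ S then [p] else []) := by
  induction S generalizing d with
  | nil => simp
  | cons w S ih =>
      have hw : w ∉ S := (List.nodup_cons.mp hS).1
      have hS' : S.Nodup := (List.nodup_cons.mp hS).2
      rw [List.foldl_cons, ih hS']
      rw [PySem.Dict.getD_modify]
      by_cases hvw : v = w
      · subst hvw
        simp [hw]
      · simp [hvw, List.mem_cons]

-- outer loop: B's preds dictionary at key v holds exactly the keys whose list contains v
theorem preds_getD (its : List (Int × List Int)) (d : PySem.Dict Int (List Int)) (v : Int) :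
    (its.foldl (fun d pc =>
        (PySem.Set.ofList pc.2).foldl (fun d w => d.modify w [] (· ++ [pc.1])) d) d).getD v []
      = d.getD v [] ++ (its.filter (fun pc => decide (v ∈ pc.2))).map (·.1) := by
  induction its generalizing d with
  | nil => simp
  | cons pc its ih =>
      simp only [List.foldl_cons, ih]
      rw [preds_inner _ (PySem.Set.nodup_ofList _) d pc.1 v]
      by_cases h : v ∈ pc.2
      · simp [h, PySem.Set.mem_ofList]
      · simp [h, PySem.Set.mem_ofList]

-- a 0/1 indicator sum is a filter length
theorem sum_indicator (m : List (Int × List Int)) (p : Int × List Int → Prop) [DecidablePred p] :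
    (m.map (fun a => if p a then (1:Int) else 0)).sum
      = ((m.filter (fun a => decide (p a))).length : Int) := by
  induction m with
  | nil => simp
  | cons a m ih =>
      by_cases h : p a
      · simp [h, ih]; ring
      · simp [h, ih]

-- exchanging the two scans in A's column 3
theorem swap_filter_sum (l m : List (Int × List Int)) :
    (l.map (fun b => ((m.filter (fun a => decide (a.1 ∈ b.2))).length : Int))).sum
      = (m.map (fun a => ((l.filter (fun b => decide (a.1 ∈ b.2))).length : Int))).sum := by
  induction l with
  | nil => simp
  | cons b l ih =>
      have hsplit : ∀ a : Int × List Int,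
          (((b :: l).filter (fun b' => decide (a.1 ∈ b'.2))).length : Int)
            = (if a.1 ∈ b.2 then (1:Int) else 0) + ((l.filter (fun b' => decide (a.1 ∈ b'.2))).length : Int) := by
        intro a
        by_cases h : a.1 ∈ b.2
        · simp [h]; ring
        · simp [h]
      simp only [List.map_cons, List.sum_cons, ih, hsplit, List.sum_map_add]
      rw [sum_indicator m (fun a => a.1 ∈ b.2)]

theorem count_ones (its : List (Int × List Int)) (v : Int) :
    ((its.map (·.2)).map (fun nodes => if v ∈ nodes then (1:Int) else 0)).sum
      = ((its.filter (fun pc => decide (v ∈ pc.2))).length : Int) := by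
  rw [List.map_map]
  exact sum_indicator its (fun pc => v ∈ pc.2)

-- ===== VERDICT (by name: the statement is the Claim_ definition above) =====
theorem calc_matrix_spec : Claim_equal_calc_matrix := by
  intro matrix graph _
  show calc_matrix matrix graph = calc_matrix_alt matrix graph
  simp only [calc_matrix, calc_matrix_alt]
  refine List.map_congr_left ?_
  intro i _
  dsimp only
  have epreds : ∀ p : Int,
      (((PySem.Dict.ofList graph).items.foldl (fun d pc =>
          (PySem.Set.ofList pc.2).foldl (fun d w => d.modify w [] (· ++ [pc.1])) d)
          PySem.Dict.empty).getD p [])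
        = ((PySem.Dict.ofList graph).items.filter (fun pc => decide (p ∈ pc.2))).map (·.1) := by
    intro p
    rw [preds_getD]
    simp [PySem.Dict.getD_empty]
  have e0 : (if (PySem.Dict.ofList graph).contains (i+1) = true
        then (((PySem.Dict.ofList graph).getD (i+1) []).length : Int) else 0)
      = (((PySem.Dict.ofList graph).getD (i+1) []).length : Int) := by
    cases hc : (PySem.Dict.ofList graph).contains (i+1) with
    | true => simp
    | false =>
        have h : (PySem.Dict.ofList graph).getD (i+1) [] = [] := by
          rw [PySem.Dict.getD_of_not_contains]; exact hc
        simp [h]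
  have e1 : (List.map (fun nodes => if i + 1 ∈ nodes then (1:Int) else 0) (PySem.Dict.ofList graph).values).sum
      = ((((PySem.Dict.ofList graph).items.filter (fun pc => decide (i+1 ∈ pc.2))).length : Nat) : Int) := by
    have h := count_ones (PySem.Dict.ofList graph).items (i+1)
    simpa [PySem.Dict.values] using h
  have e3 : ((List.flatMap
        (fun pc2 => List.filter (fun pc1 => decide (i + 1 ∈ pc1.2) && decide (pc1.1 ∈ pc2.2)) (PySem.Dict.ofList graph).items)
        (PySem.Dict.ofList graph).items).length : Int)
      = ((((PySem.Dict.ofList graph).items.filter (fun pc => decide (i+1 ∈ pc.2))).map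
          (fun a => ((((PySem.Dict.ofList graph).items.filter (fun b => decide (a.1 ∈ b.2))).length : Nat) : Int))).sum) := by
    rw [List.length_flatMap, Nat.cast_list_sum (R := Int), List.map_map]
    have hip : ∀ pc2 ∈ (PySem.Dict.ofList graph).items,
        ((Nat.cast ∘ fun pc2 => (List.filter (fun pc1 => decide (i + 1 ∈ pc1.2) && decide (pc1.1 ∈ pc2.2)) (PySem.Dict.ofList graph).items).length) pc2 : Int)
          = (fun b => (((((PySem.Dict.ofList graph).items.filter (fun pc => decide (i+1 ∈ pc.2))).filter (fun a => decide (a.1 ∈ b.2))).length : Nat) : Int)) pc2 := by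
      intro pc2 _
      simp only [Function.comp_apply, Nat.cast_inj]
      rw [List.filter_filter]
      congr 1
      exact List.filter_congr (fun x _ => Bool.and_comm _ _)
    rw [List.map_congr_left hip]
    exact swap_filter_sum (PySem.Dict.ofList graph).items
      ((PySem.Dict.ofList graph).items.filter (fun pc => decide (i+1 ∈ pc.2)))
  simp only [epreds, e0, e1, e3, pyIntEqList, List.map_map, List.length_map]
  simp [Function.comp_def]
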